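-- pv_equiv track=rewrite | github.com/Murazakl/main | I23/tp_3.py | phoque
-- ===== SOURCE A (Python) =====
-- def phoque(n):
--     if n == 1: return ["."]
--     elif n == 2: return ["-",".."]
--
--     n1 = []
--     for i in phoque(n-1):
--         n1 += [i + "."]
--     n2 = []
--     for j in phoque(n-2):
--         n2 += [j + "-"]
--     return n1 + n2
-- ===== SOURCE B (Python) =====
-- def phoque(n):
--     if n < 1:
--         raise ValueError("n must be a positive integer")
--     if n == 1:
--         return ["."]
--     if n == 2:
--         return ["-", ".."]
--     a, b = ["."], ["-", ".."]
--     for _ in range(n - 2):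
--         a, b = b, [x + "." for x in b] + [y + "-" for y in a]
--     return b
-- ===== Notes on version B (the rewrite author's own statement) =====
-- stated objective: alternative
-- what changed: Replaced the doubly-recursive definition, which recomputes the same smaller results many times over, by a bottom-up loop that keeps only the previous two lists.
import Mathlib
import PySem

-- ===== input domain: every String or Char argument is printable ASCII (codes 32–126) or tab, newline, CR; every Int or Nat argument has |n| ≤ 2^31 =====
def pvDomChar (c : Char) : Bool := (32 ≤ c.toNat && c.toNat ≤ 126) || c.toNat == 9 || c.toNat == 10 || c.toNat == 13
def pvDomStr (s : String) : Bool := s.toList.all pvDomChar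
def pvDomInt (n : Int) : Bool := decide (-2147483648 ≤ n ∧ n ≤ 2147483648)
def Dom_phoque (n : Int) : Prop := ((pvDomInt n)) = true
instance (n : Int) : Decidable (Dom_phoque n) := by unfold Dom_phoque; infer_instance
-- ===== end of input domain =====

-- B replaces A's doubly-recursive definition by a bottom-up loop keeping the previous two lists (objective: alternative).

-- ===== PORT A =====
-- A recurses on n-1 and n-2 from the Int argument; under Pre_ (1 ≤ n) this Nat-indexed
-- structural recursion is the same computation step for step (the 0 case is unreachable).
def phoqueA : Nat → List String
  | 0 => []
  | 1 => ["."]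
  | 2 => ["-", ".."]
  | (k+3) =>
      ((phoqueA (k+2)).foldl (fun n1 i => n1 ++ [i ++ "."]) []) ++
      ((phoqueA (k+1)).foldl (fun n2 j => n2 ++ [j ++ "-"]) [])

def phoque (n : Int) : List String := phoqueA n.toNat

-- ===== PORT B =====
def phoqueStep : List String × List String → List String × List String
  | (a, b) => (b, b.map (fun x => x ++ ".") ++ a.map (fun y => y ++ "-"))

def phoque_alt (n : Int) : List String :=
  if n < 1 then []  -- Source B raises ValueError here; outside Pre_, nothing is claimed
  else if n == 1 then ["."]
  else if n == 2 then ["-", ".."]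
  else (phoqueStep^[(n - 2).toNat] (["."], ["-", ".."])).2

-- ===== PRECONDITION & SPEC =====
-- A's recursion never reaches a base case for non-positive n (it raises RecursionError),
-- and Source B raises ValueError there too, so Pre_ admits positive n only.
def Pre_phoque (n : Int) : Prop := 1 ≤ n
instance (n : Int) : Decidable (Pre_phoque n) := by unfold Pre_phoque; infer_instance
def pvWitness_phoque : Int := (3)

def Spec_phoque (n : Int) (out : List String) : Prop := out = phoque_alt n
instance (n : Int) (out : List String) : Decidable (Spec_phoque n out) := by unfold Spec_phoque; infer_instance

-- ===== CLAIM (what is proved, stated in full; the proofs are below) =====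
def Claim_equal_phoque : Prop := ∀ (n : Int), Dom_phoque n → Pre_phoque n → Spec_phoque n (phoque n)

-- ===== LEMMAS AND PROOFS =====
theorem foldl_append_map (l : List String) (s : String) (acc : List String) :
    l.foldl (fun r i => r ++ [i ++ s]) acc = acc ++ l.map (fun i => i ++ s) := by
  induction l generalizing acc with
  | nil => simp
  | cons h t ih => simp [List.foldl, ih]

theorem iterate_phoqueStep (k : Nat) :
    phoqueStep^[k] (["."], ["-", ".."]) = (phoqueA (k+1), phoqueA (k+2)) := by
  induction k with
  | zero => simp [phoqueA]
  | succ k ih =>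
      rw [Function.iterate_succ_apply', ih]
      show (phoqueA (k+2), _) = _
      refine Prod.ext rfl ?_
      show (phoqueA (k+2)).map (fun x => x ++ ".") ++ (phoqueA (k+1)).map (fun y => y ++ "-")
        = phoqueA (k+3)
      conv_rhs => rw [phoqueA]
      rw [foldl_append_map, foldl_append_map]
      simp

-- ===== VERDICT (by name: the statement is the Claim_ definition above) =====
theorem phoque_spec : Claim_equal_phoque := by
  intro n _ hpre
  unfold Spec_phoque phoque phoque_alt
  unfold Pre_phoque at hpre
  by_cases h1 : n = 1
  · subst h1; simp [phoqueA]
  · by_cases h2 : n = 2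
    · subst h2; simp [phoqueA]
    · have h3 : (3 : Int) ≤ n := by omega
      have hn : n.toNat = (n - 2).toNat + 2 := by omega
      rw [iterate_phoqueStep, hn]
      simp [h1, h2, show ¬ n < 1 by omega]
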